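-- pv_equiv track=rewrite | github.com/hydralisk2020/Playground | script.py | analyze_field
-- ===== SOURCE A (Python) =====
-- def analyze_field(f):
--     max_col = len(f[0])
--     max_row = len(f)
--     cols = [[] for _ in range(max_col)]
--     rows = [[] for _ in range(max_row)]
--     fdiag = [[] for _ in range(max_row + max_col - 1)]
--     bdiag = [[] for _ in range(len(fdiag))]
--     min_bdiag = -max_row + 1
--
--     for x in range(max_col):
--         for y in range(max_row):
--             cols[x].append(f[y][x])
--             rows[y].append(f[y][x])
--             fdiag[x + y].append(f[y][x])
--             bdiag[x - y - min_bdiag].append(f[y][x])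
--
--     return {
--         'columns': cols,
--         'rows': rows,
--         'fdiag': fdiag,
--         'bdiag': bdiag
--     }
-- ===== SOURCE B (Python) =====
-- def analyze_field(f):
--     max_col = len(f[0])
--     max_row = len(f)
--     rows = [[f[y][x] for x in range(max_col)] for y in range(max_row)]
--     cols = [[f[y][x] for y in range(max_row)] for x in range(max_col)]
--     ndiag = max_row + max_col - 1
--     # each diagonal is walked directly, cells emitted in increasing-x order
--     fdiag = [[f[d - x][x] for x in range(max(0, d - max_row + 1), min(d + 1, max_col))]
--              for d in range(ndiag)]
--     bdiag = [[f[x - k + max_row - 1][x] for x in range(max(0, k - max_row + 1), min(k + 1, max_col))]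
--              for k in range(ndiag)]
--     return {
--         'columns': cols,
--         'rows': rows,
--         'fdiag': fdiag,
--         'bdiag': bdiag
--     }
-- ===== Notes on version B (the rewrite author's own statement) =====
-- stated objective: alternative
-- what changed: Replaces A's single fused x/y scatter loop that appends each cell into four shared accumulator lists with direct indexed comprehensions: rows and columns read off by index, and each (anti)diagonal walked explicitly over its own x-range.
import Mathlib
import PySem

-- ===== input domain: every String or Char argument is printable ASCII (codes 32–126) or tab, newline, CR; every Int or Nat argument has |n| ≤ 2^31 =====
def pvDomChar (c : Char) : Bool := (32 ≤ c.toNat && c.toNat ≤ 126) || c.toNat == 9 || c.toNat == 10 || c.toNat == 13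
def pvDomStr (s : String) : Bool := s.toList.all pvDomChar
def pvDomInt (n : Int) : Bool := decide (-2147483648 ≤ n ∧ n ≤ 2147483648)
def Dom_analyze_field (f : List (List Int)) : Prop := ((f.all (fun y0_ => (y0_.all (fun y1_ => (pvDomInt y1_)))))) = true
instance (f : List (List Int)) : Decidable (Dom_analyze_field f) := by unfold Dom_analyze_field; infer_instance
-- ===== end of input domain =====

-- B regroups the grid by direct indexed comprehensions (rows/cols read off by index, each
-- diagonal walked over its own x-range) instead of A's fused scatter loop; objective: alternative.

-- ===== PORT A =====
-- A's single fused loop over x (outer) and y (inner), appending f[y][x] into the four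
-- accumulator lists at indices x, y, x+y and x - y - min_bdiag (= x + max_row - 1 - y).
-- f[0] on empty f and f[y][x] on a too-short row raise IndexError in Python: those inputs
-- are excluded by Pre_analyze_field; getD supplies a stand-in value there.
def analyze_field (f : List (List Int)) : List (String × List (List Int)) :=
  let max_col : Nat := (f.headD []).length
  let max_row : Nat := f.length
  let cols0 := List.replicate max_col ([] : List Int)
  let rows0 := List.replicate max_row ([] : List Int)
  let fdiag0 := List.replicate (max_row + max_col - 1) ([] : List Int)
  let bdiag0 := List.replicate (max_row + max_col - 1) ([] : List Int)
  let st := (List.range max_col).foldl (fun st x =>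
      (List.range max_row).foldl (fun st y =>
        (st.1.modify x (· ++ [(f.getD y []).getD x 0]),
         st.2.1.modify y (· ++ [(f.getD y []).getD x 0]),
         st.2.2.1.modify (x + y) (· ++ [(f.getD y []).getD x 0]),
         st.2.2.2.modify (x + max_row - 1 - y) (· ++ [(f.getD y []).getD x 0]))) st)
    (cols0, rows0, fdiag0, bdiag0)
  [("columns", st.1), ("rows", st.2.1), ("fdiag", st.2.2.1), ("bdiag", st.2.2.2)]

-- ===== PORT B =====
-- B builds each group directly: rows and cols as indexed comprehensions, each diagonal as a
-- walk over its valid x-range [max(0, d - max_row + 1), min(d + 1, max_col)) (in Nat the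
-- lower bound max(0, d - max_row + 1) is d + 1 - max_row); y indices x - k + max_row - 1
-- are written with the additions first, as they are nonnegative on the walked range.
def analyze_field_alt (f : List (List Int)) : List (String × List (List Int)) :=
  let max_col : Nat := (f.headD []).length
  let max_row : Nat := f.length
  let rows := (List.range max_row).map (fun y =>
      (List.range max_col).map (fun x => (f.getD y []).getD x 0))
  let cols := (List.range max_col).map (fun x =>
      (List.range max_row).map (fun y => (f.getD y []).getD x 0))
  let ndiag := max_row + max_col - 1
  let fdiag := (List.range ndiag).map (fun d =>
      (List.range' (d + 1 - max_row) (min (d + 1) max_col - (d + 1 - max_row))).map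
        (fun x => (f.getD (d - x) []).getD x 0))
  let bdiag := (List.range ndiag).map (fun k =>
      (List.range' (k + 1 - max_row) (min (k + 1) max_col - (k + 1 - max_row))).map
        (fun x => (f.getD (x + max_row - 1 - k) []).getD x 0))
  [("columns", cols), ("rows", rows), ("fdiag", fdiag), ("bdiag", bdiag)]

-- ===== PRECONDITION & SPEC =====
-- Pre_ excludes exactly the inputs where Python A raises IndexError: the empty grid (f[0])
-- and grids with a row shorter than the first row (f[y][x] for x < len(f[0])).
def Pre_analyze_field (f : List (List Int)) : Prop :=
  f ≠ [] ∧ ∀ r ∈ f, (f.headD []).length ≤ r.length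
instance (f : List (List Int)) : Decidable (Pre_analyze_field f) := by
  unfold Pre_analyze_field; infer_instance

def pvWitness_analyze_field : List (List Int) := [[1, 2, 3], [4, 5, 6]]

def Spec_analyze_field (f : List (List Int)) (out : List (String × List (List Int))) : Prop := out = analyze_field_alt f
instance (f : List (List Int)) (out : List (String × List (List Int))) : Decidable (Spec_analyze_field f out) := by unfold Spec_analyze_field; infer_instance

-- ===== CLAIM (what is proved, stated in full; the proofs are below) =====
def Claim_equal_analyze_field : Prop := ∀ (f : List (List Int)), Dom_analyze_field f → Pre_analyze_field f → Spec_analyze_field f (analyze_field f)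

-- ===== LEMMAS AND PROOFS =====

-- the nested x/y loop is a fold over the lexicographic pair list
lemma pv_foldl_nested {α β γ : Type} (step : γ → α → β → γ) (xs : List α) (ys : List β)
    (init : γ) :
    xs.foldl (fun st x => ys.foldl (fun st y => step st x y) st) init
      = (xs.flatMap (fun x => ys.map (Prod.mk x))).foldl (fun st p => step st p.1 p.2) init := by
  induction xs generalizing init with
  | nil => simp
  | cons a xs ih => simp [List.foldl_append, List.foldl_map, ih]

-- a componentwise fold over a quadruple splits into four folds
lemma pv_foldl_prod4 {α γ1 γ2 γ3 γ4 : Type} (g1 : γ1 → α → γ1) (g2 : γ2 → α → γ2)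
    (g3 : γ3 → α → γ3) (g4 : γ4 → α → γ4) (l : List α) (c1 : γ1) (c2 : γ2) (c3 : γ3) (c4 : γ4) :
    l.foldl (fun st p => (g1 st.1 p, g2 st.2.1 p, g3 st.2.2.1 p, g4 st.2.2.2 p)) (c1, c2, c3, c4)
      = (l.foldl g1 c1, l.foldl g2 c2, l.foldl g3 c3, l.foldl g4 c4) := by
  induction l generalizing c1 c2 c3 c4 with
  | nil => rfl
  | cons a l ih => simpa using ih (g1 c1 a) (g2 c2 a) (g3 c3 a) (g4 c4 a)

lemma pv_modify_range_map (n j : Nat) (g : Nat → List Int) (_hj : j < n)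
    (t : List Int → List Int) :
    ((List.range n).map g).modify j t
      = (List.range n).map (fun i => if j = i then t (g i) else g i) := by
  apply List.ext_getElem
  · simp
  · intro i h1 h2
    simp at h1
    simp [List.getElem_modify]

-- appending each value at its index, starting from an indexed family, appends the filtered values
lemma pv_scatter {α : Type} (ps : List α) (ι : α → Nat) (v : α → Int) (n : Nat)
    (h : ∀ p ∈ ps, ι p < n) (g : Nat → List Int) :
    ps.foldl (fun acc p => acc.modify (ι p) (· ++ [v p])) ((List.range n).map g)
      = (List.range n).map (fun i => g i ++ (ps.filter (fun p => decide (ι p = i))).map v) := by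
  induction ps generalizing g with
  | nil => simp
  | cons p ps ih =>
    rw [List.foldl_cons, pv_modify_range_map n (ι p) g (h p (by simp)) (· ++ [v p]),
      ih (fun q hq => h q (by simp [hq]))]
    apply List.map_congr_left
    intro i _
    by_cases hc : ι p = i <;> simp [hc]

lemma pv_replicate_eq_map (n : Nat) :
    List.replicate n ([] : List Int) = (List.range n).map (fun _ => ([] : List Int)) := by
  induction n with
  | zero => rfl
  | succ n ih => rw [List.range_succ, List.map_append, ← ih, List.replicate_succ']; rfl

lemma pv_filter_flatMap {α β : Type} (l : List α) (g : α → List β) (q : β → Bool) :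
    (l.flatMap g).filter q = l.flatMap (fun a => (g a).filter q) := by
  induction l with
  | nil => rfl
  | cons a l ih => simp [List.filter_append, ih]

lemma pv_flatMap_guard {α β : Type} (l : List α) (q : α → Bool) (h : α → β) :
    l.flatMap (fun x => if q x then [h x] else []) = (l.filter q).map h := by
  induction l with
  | nil => rfl
  | cons a l ih =>
    by_cases hq : q a <;> simp [hq, ih]

lemma pv_flatMap_singleton {α β : Type} (l : List α) (h : α → β) :
    l.flatMap (fun x => [h x]) = l.map h := by
  induction l with
  | nil => rfl
  | cons a l ih => simp [ih]

lemma pv_flatMap_range_single {β : Type} (n i : Nat) (hi : i < n) (l : Nat → List β) :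
    (List.range n).flatMap (fun x => if i = x then l x else []) = l i := by
  induction n with
  | zero => omega
  | succ n ih =>
    rw [List.range_succ, List.flatMap_append]
    by_cases hin : i = n
    · subst hin
      have : (List.range i).flatMap (fun x => if i = x then l x else []) = [] := by
        apply List.flatMap_eq_nil_iff.mpr
        intro x hx
        rw [if_neg (by simp at hx; omega)]
      simp [this]
    · have hi' : i < n := by omega
      rw [ih hi']
      simp [hin]

lemma pv_range_filter_singleton (n j : Nat) (q : Nat → Bool) (_hj : j < n)
    (hq : ∀ y, y < n → (q y = true ↔ y = j)) :
    (List.range n).filter q = [j] := by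
  induction n with
  | zero => omega
  | succ n ih =>
    rw [List.range_succ, List.filter_append]
    by_cases hjn : j = n
    · subst hjn
      have h1 : (List.range j).filter q = [] := by
        apply List.filter_eq_nil_iff.mpr
        intro y hy
        simp at hy
        simp only [Bool.not_eq_true]
        by_contra hb
        have := (hq y (by omega)).1 (by simpa using hb)
        omega
      have h2 : q j = true := (hq j (by omega)).2 rfl
      simp [h1, h2]
    · have h2 : q n = false := by
        by_contra hb
        have := (hq n (by omega)).1 (by simpa using hb)
        omega
      rw [ih (by omega) (fun y hy => hq y (by omega))]
      simp [h2]

lemma pv_range_filter_none (n : Nat) (q : Nat → Bool) (hq : ∀ y, y < n → q y = false) :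
    (List.range n).filter q = [] := by
  apply List.filter_eq_nil_iff.mpr
  intro y hy
  simp at hy
  simp [hq y hy]

lemma pv_range_filter_interval (n a b : Nat) :
    (List.range n).filter (fun x => decide (a ≤ x ∧ x ≤ b))
      = List.range' a (min (b + 1) n - a) := by
  induction n with
  | zero => simp
  | succ n ih =>
    rw [List.range_succ, List.filter_append, ih]
    by_cases h1 : a ≤ n ∧ n ≤ b
    · have e1 : min (b + 1) (n + 1) - a = (min (b + 1) n - a) + 1 := by omega
      have e2 : a + 1 * (min (b + 1) n - a) = n := by omega
      rw [e1, List.range'_concat, e2]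
      simp [h1.1, h1.2]
    · have e1 : min (b + 1) (n + 1) - a = min (b + 1) n - a := by omega
      rw [e1]
      simp
      omega

-- ===== the four component characterisations =====

-- membership in the lexicographic pair list of A's loop
lemma pv_mem_pairs {C R : Nat} {p : Nat × Nat}
    (hp : p ∈ (List.range C).flatMap (fun x => (List.range R).map (Prod.mk x))) :
    p.1 < C ∧ p.2 < R := by
  simp at hp
  obtain ⟨x, hx, y, hy, rfl⟩ := hp
  exact ⟨hx, hy⟩

lemma pv_cols_filter (C R i : Nat) (hi : i < C) :
    ((List.range C).flatMap (fun x => (List.range R).map (Prod.mk x))).filter (fun p => decide (p.1 = i)) = (List.range R).map (Prod.mk i) := by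
  rw [pv_filter_flatMap]
  have hblk : ∀ x : Nat, ((List.range R).map (Prod.mk x)).filter (fun p => decide (p.1 = i))
      = if i = x then (List.range R).map (Prod.mk x) else [] := by
    intro x
    rw [List.filter_map]
    by_cases hx : i = x
    · subst hx
      have ht : ((fun p : Nat × Nat => decide (p.1 = i)) ∘ Prod.mk i) = fun _ => true := by
        funext y; simp
      rw [ht]
      simp
    · have ht : ((fun p : Nat × Nat => decide (p.1 = i)) ∘ Prod.mk x) = fun _ => false := by
        funext y; simp; omega
      rw [ht]
      simp [hx]
  simp only [hblk]
  exact pv_flatMap_range_single C i hi _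

lemma pv_rows_filter (C R i : Nat) (hi : i < R) :
    ((List.range C).flatMap (fun x => (List.range R).map (Prod.mk x))).filter (fun p => decide (p.2 = i)) = (List.range C).map (fun x => (x, i)) := by
  rw [pv_filter_flatMap]
  have hblk : ∀ x : Nat, ((List.range R).map (Prod.mk x)).filter (fun p => decide (p.2 = i))
      = [(x, i)] := by
    intro x
    rw [List.filter_map]
    have : ((fun p : Nat × Nat => decide (p.2 = i)) ∘ Prod.mk x) = fun y => decide (y = i) := by
      funext y; simp
    rw [this, pv_range_filter_singleton R i _ hi (by intro y _; simp)]
    rfl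
  simp only [hblk]
  exact pv_flatMap_singleton _ _

lemma pv_fdiag_filter (C R d : Nat) :
    ((List.range C).flatMap (fun x => (List.range R).map (Prod.mk x))).filter (fun p => decide (p.1 + p.2 = d))
      = (List.range' (d + 1 - R) (min (d + 1) C - (d + 1 - R))).map (fun x => (x, d - x)) := by
  rw [pv_filter_flatMap]
  have hblk : ∀ x : Nat, ((List.range R).map (Prod.mk x)).filter (fun p => decide (p.1 + p.2 = d))
      = if decide (d + 1 - R ≤ x ∧ x ≤ d) then [(x, d - x)] else [] := by
    intro x
    rw [List.filter_map]
    have : ((fun p : Nat × Nat => decide (p.1 + p.2 = d)) ∘ Prod.mk x)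
        = fun y => decide (x + y = d) := by
      funext y; simp
    rw [this]
    by_cases hc : d + 1 - R ≤ x ∧ x ≤ d
    · rw [pv_range_filter_singleton R (d - x) _ (by omega) (by intro y _; simp; omega)]
      simp [hc]
    · rw [pv_range_filter_none R _ (by intro y hy; simp; omega)]
      simp
      omega
  simp only [hblk]
  rw [pv_flatMap_guard, pv_range_filter_interval]

lemma pv_bdiag_filter (C R k : Nat) :
    ((List.range C).flatMap (fun x => (List.range R).map (Prod.mk x))).filter (fun p => decide (p.1 + R - 1 - p.2 = k))
      = (List.range' (k + 1 - R) (min (k + 1) C - (k + 1 - R))).map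
          (fun x => (x, x + R - 1 - k)) := by
  rw [pv_filter_flatMap]
  have hblk : ∀ x : Nat,
      ((List.range R).map (Prod.mk x)).filter (fun p => decide (p.1 + R - 1 - p.2 = k))
      = if decide (k + 1 - R ≤ x ∧ x ≤ k) then [(x, x + R - 1 - k)] else [] := by
    intro x
    rw [List.filter_map]
    have : ((fun p : Nat × Nat => decide (p.1 + R - 1 - p.2 = k)) ∘ Prod.mk x)
        = fun y => decide (x + R - 1 - y = k) := by
      funext y; simp
    rw [this]
    by_cases hc : k + 1 - R ≤ x ∧ x ≤ k
    · rw [pv_range_filter_singleton R (x + R - 1 - k) _ (by omega) (by intro y hy; simp; omega)]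
      simp [hc]
    · rw [pv_range_filter_none R _ (by intro y hy; simp; omega)]
      simp
      omega
  simp only [hblk]
  rw [pv_flatMap_guard, pv_range_filter_interval]

-- the fused scatter loop of A computes exactly B's four indexed families
lemma pv_loop_eq (f : List (List Int)) (C R : Nat) :
    (List.range C).foldl (fun st x => (List.range R).foldl (fun st y =>
        (st.1.modify x (· ++ [(f.getD y []).getD x 0]),
         st.2.1.modify y (· ++ [(f.getD y []).getD x 0]),
         st.2.2.1.modify (x + y) (· ++ [(f.getD y []).getD x 0]),
         st.2.2.2.modify (x + R - 1 - y) (· ++ [(f.getD y []).getD x 0]))) st)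
      (List.replicate C ([] : List Int), List.replicate R ([] : List Int),
       List.replicate (R + C - 1) ([] : List Int), List.replicate (R + C - 1) ([] : List Int))
    = ((List.range C).map (fun x => (List.range R).map (fun y => (f.getD y []).getD x 0)),
       (List.range R).map (fun y => (List.range C).map (fun x => (f.getD y []).getD x 0)),
       (List.range (R + C - 1)).map (fun d =>
         (List.range' (d + 1 - R) (min (d + 1) C - (d + 1 - R))).map
           (fun x => (f.getD (d - x) []).getD x 0)),
       (List.range (R + C - 1)).map (fun k =>
         (List.range' (k + 1 - R) (min (k + 1) C - (k + 1 - R))).map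
           (fun x => (f.getD (x + R - 1 - k) []).getD x 0))) := by
  have h1 := pv_foldl_nested (fun st x y =>
        (st.1.modify x (· ++ [(f.getD y []).getD x 0]),
         st.2.1.modify y (· ++ [(f.getD y []).getD x 0]),
         st.2.2.1.modify (x + y) (· ++ [(f.getD y []).getD x 0]),
         st.2.2.2.modify (x + R - 1 - y) (· ++ [(f.getD y []).getD x 0]))) (List.range C)
        (List.range R)
      (List.replicate C ([] : List Int), List.replicate R ([] : List Int),
       List.replicate (R + C - 1) ([] : List Int), List.replicate (R + C - 1) ([] : List Int))
  beta_reduce at h1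
  rw [h1]
  have h2 := pv_foldl_prod4
        (fun acc (p : Nat × Nat) => acc.modify p.1 (· ++ [(f.getD p.2 []).getD p.1 0]))
        (fun acc (p : Nat × Nat) => acc.modify p.2 (· ++ [(f.getD p.2 []).getD p.1 0]))
        (fun acc (p : Nat × Nat) => acc.modify (p.1 + p.2) (· ++ [(f.getD p.2 []).getD p.1 0]))
        (fun acc (p : Nat × Nat) => acc.modify (p.1 + R - 1 - p.2) (· ++ [(f.getD p.2 []).getD p.1 0]))
        ((List.range C).flatMap (fun x => (List.range R).map (Prod.mk x)))
        (List.replicate C ([] : List Int)) (List.replicate R ([] : List Int))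
        (List.replicate (R + C - 1) ([] : List Int)) (List.replicate (R + C - 1) ([] : List Int))
  beta_reduce at h2
  rw [h2]
  rw [pv_replicate_eq_map C, pv_replicate_eq_map R, pv_replicate_eq_map (R + C - 1)]
  have hs1 := pv_scatter ((List.range C).flatMap (fun x => (List.range R).map (Prod.mk x)))
      (fun p : Nat × Nat => p.1) (fun p : Nat × Nat => (f.getD p.2 []).getD p.1 0)
      C (fun p hp => (pv_mem_pairs hp).1) (fun _ => ([] : List Int))
  have hs2 := pv_scatter ((List.range C).flatMap (fun x => (List.range R).map (Prod.mk x)))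
      (fun p : Nat × Nat => p.2) (fun p : Nat × Nat => (f.getD p.2 []).getD p.1 0)
      R (fun p hp => (pv_mem_pairs hp).2) (fun _ => ([] : List Int))
  have hs3 := pv_scatter ((List.range C).flatMap (fun x => (List.range R).map (Prod.mk x)))
      (fun p : Nat × Nat => p.1 + p.2) (fun p : Nat × Nat => (f.getD p.2 []).getD p.1 0)
      (R + C - 1) (fun p hp => by have := pv_mem_pairs hp; show p.1 + p.2 < R + C - 1; omega)
      (fun _ => ([] : List Int))
  have hs4 := pv_scatter ((List.range C).flatMap (fun x => (List.range R).map (Prod.mk x)))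
      (fun p : Nat × Nat => p.1 + R - 1 - p.2) (fun p : Nat × Nat => (f.getD p.2 []).getD p.1 0)
      (R + C - 1) (fun p hp => by have := pv_mem_pairs hp; show p.1 + R - 1 - p.2 < R + C - 1; omega)
      (fun _ => ([] : List Int))
  beta_reduce at hs1 hs2 hs3 hs4
  rw [hs1, hs2, hs3, hs4]
  refine congrArg₂ Prod.mk ?_ (congrArg₂ Prod.mk ?_ (congrArg₂ Prod.mk ?_ ?_))
  · apply List.map_congr_left
    intro i hi
    rw [List.nil_append, pv_cols_filter C R i (by simpa using hi), List.map_map]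
    rfl
  · apply List.map_congr_left
    intro i hi
    rw [List.nil_append, pv_rows_filter C R i (by simpa using hi), List.map_map]
    rfl
  · apply List.map_congr_left
    intro d _
    rw [List.nil_append, pv_fdiag_filter C R d, List.map_map]
    rfl
  · apply List.map_congr_left
    intro k _
    rw [List.nil_append, pv_bdiag_filter C R k, List.map_map]
    rfl

-- ===== VERDICT (by name: the statement is the Claim_ definition above) =====
theorem analyze_field_spec : Claim_equal_analyze_field := by
  intro f _ _
  unfold Spec_analyze_field analyze_field analyze_field_alt
  simp only [pv_loop_eq f ((f.headD []).length) f.length]
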